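-- pv_equiv track=rewrite | github.com/slykid/Python3 | Python Basic/CodingTest/Python_Algorithm_Interview/12_buy_sell_stock.py | solution
-- ===== SOURCE A (Python) =====
-- def solution(input):
--     _gain = 0
--     _buy = 0
--     _gap = 0
--
--     for i in input:
--         if _buy == 0:
--             if i == min(input):
--                 _buy = i
--             else:
--                 pass
--         else:
--             if max(abs(i - _buy), _gap) > _gap :
--                 _gap = abs(i - _buy)
--             else:
--                 pass
--     return _gap
-- ===== SOURCE B (Python) =====
-- def solution(input):
--     m = None
--     best = None
--     for x in input:
--         if m is None or x < m:
--             m = x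
--             best = None
--         elif best is None or x > best:
--             best = x
--     return 0 if best is None else best - m
-- ===== Notes on version B (the rewrite author's own statement) =====
-- stated objective: faster
-- what changed: Replaces A's flag-driven pass that recomputes min(input) on every iteration until activation with a single running-min-with-reset pass: track the minimum seen so far and the best element seen since the minimum last changed, returning best - min at the end.
-- intended difference: On nonempty inputs whose minimum is 0 and which have a nonzero element after the first 0, A returns 0 because buying at price 0 never activates its _buy==0 sentinel flag, while B returns the true maximal gap max|x-0| over the suffix, which is the intended max-gap-from-first-minimum value. — e.g. on solution([0, 3]): A returns 0, B returns 3
import Mathlib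
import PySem

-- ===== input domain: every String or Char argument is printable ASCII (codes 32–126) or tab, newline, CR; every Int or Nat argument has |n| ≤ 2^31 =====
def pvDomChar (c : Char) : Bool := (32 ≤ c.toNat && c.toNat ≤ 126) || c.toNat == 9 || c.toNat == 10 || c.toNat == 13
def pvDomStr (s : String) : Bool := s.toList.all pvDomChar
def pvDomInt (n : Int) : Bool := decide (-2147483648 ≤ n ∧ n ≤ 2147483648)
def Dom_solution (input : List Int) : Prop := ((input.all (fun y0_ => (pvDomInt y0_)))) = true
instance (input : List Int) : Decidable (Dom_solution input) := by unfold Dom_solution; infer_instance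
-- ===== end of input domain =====

-- B replaces A's flag-driven pass (which recomputes min(input) each iteration) with a single
-- running-min-with-reset pass; return value only.

-- ===== PORT A =====
def solution (input : List Int) : Int :=
  (input.foldl (fun s i =>
      if s.1 = 0 then
        if some i = PySem.List.min? input (fun y => y) then (i, s.2) else s
      else
        if max (|i - s.1|) s.2 > s.2 then (s.1, |i - s.1|) else s)
    ((0 : Int), (0 : Int))).2

-- ===== PORT B =====
-- state: (running minimum so far, best element seen since the minimum last changed)
def stepB (s : Option Int × Option Int) (x : Int) : Option Int × Option Int :=
  match s with
  | (none, _) => (some x, none)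
  | (some m, best) =>
    if x < m then (some x, none)
    else
      match best with
      | none => (some m, some x)
      | some b => if x > b then (some m, some x) else (some m, some b)

def solution_alt (input : List Int) : Int :=
  match input.foldl stepB (none, none) with
  | (some m, some b) => b - m
  | _ => 0

-- ===== PRECONDITION & SPEC =====
-- On nonempty inputs whose minimum is 0 and which have a nonzero element after the first 0,
-- A returns 0 (buying at price 0 never activates its _buy==0 sentinel flag), while B returns
-- the true maximal gap max|x - 0| over the suffix, the intended max-gap-from-first-minimum value.
def D_solution (input : List Int) : Prop :=
  (0 : Int) ∈ input ∧ (∀ x ∈ input, 0 ≤ x) ∧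
    ((input.dropWhile (· ≠ (0 : Int))).tail).any (· ≠ (0 : Int)) = true
instance (input : List Int) : Decidable (D_solution input) := by unfold D_solution; infer_instance

def Spec_solution (input : List Int) (out : Int) : Prop := ¬ D_solution input → out = solution_alt input
instance (input : List Int) (out : Int) : Decidable (Spec_solution input out) := by unfold Spec_solution; infer_instance

def pvDiffWitness_solution : List Int := [0, 3]
def pvDiffWitnessOut_solution : Int × Int := (0, 3)

-- ===== CLAIM (what is proved, stated in full; the proofs are below) =====
def Claim_unchanged_solution : Prop := ∀ (input : List Int), Dom_solution input → Spec_solution input (solution input)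
def Claim_changed_solution : Prop := Dom_solution (pvDiffWitness_solution) ∧ D_solution (pvDiffWitness_solution) ∧ solution (pvDiffWitness_solution) = pvDiffWitnessOut_solution.1 ∧ solution_alt (pvDiffWitness_solution) = pvDiffWitnessOut_solution.2 ∧ pvDiffWitnessOut_solution.1 ≠ pvDiffWitnessOut_solution.2
def Claim_exact_solution : Prop := ∀ (input : List Int), Dom_solution input → D_solution input → solution input ≠ solution_alt input

-- ===== LEMMAS AND PROOFS =====

-- A's loop body, named for the proofs
def stepA (input : List Int) (s : Int × Int) (i : Int) : Int × Int :=
  if s.1 = 0 then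
    if some i = PySem.List.min? input (fun y => y) then (i, s.2) else s
  else
    if max (|i - s.1|) s.2 > s.2 then (s.1, |i - s.1|) else s

theorem solution_eq_foldl (input : List Int) :
    solution input = (input.foldl (stepA input) ((0 : Int), (0 : Int))).2 := rfl

-- with a zero minimum, A's flag never leaves 0 and the gap never changes
theorem foldl_stepA_zero_min (input : List Int)
    (h : PySem.List.min? input (fun y => y) = some 0) :
    ∀ (l : List Int) (g : Int), l.foldl (stepA input) ((0 : Int), g) = (0, g) := by
  intro l
  induction l with
  | nil => intro g; rfl
  | cons x t ih =>
    intro g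
    by_cases hx : some x = PySem.List.min? input (fun y => y)
    · have hx0 : x = 0 := by rw [h] at hx; injection hx
      subst hx0
      have hstep : stepA input ((0 : Int), g) 0 = (0, g) := by simp [stepA, hx]
      rw [List.foldl_cons, hstep]; exact ih g
    · have hstep : stepA input ((0 : Int), g) x = (0, g) := by simp [stepA, hx]
      rw [List.foldl_cons, hstep]; exact ih g

-- before the first minimum, A's state stays (0, 0)
theorem foldl_stepA_pre (input : List Int) (l : List Int)
    (h : ∀ x ∈ l, some x ≠ PySem.List.min? input (fun y => y)) :
    l.foldl (stepA input) ((0 : Int), (0 : Int)) = (0, 0) := by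
  induction l with
  | nil => rfl
  | cons x t ih =>
    have hstep : stepA input ((0 : Int), (0 : Int)) x = (0, 0) := by
      simp [stepA, h x (by simp)]
    rw [List.foldl_cons, hstep]
    exact ih (fun y hy => h y (by simp [hy]))

-- after activation at b ≠ 0, A's loop is a running max of |x - b|
theorem foldl_stepA_active (input : List Int) (b : Int) (hb : b ≠ 0) :
    ∀ (l : List Int) (g : Int),
      l.foldl (stepA input) (b, g) = (b, l.foldl (fun g x => max g |x - b|) g) := by
  intro l
  induction l with
  | nil => intro g; rfl
  | cons x t ih =>
    intro g
    have hstep : stepA input (b, g) x = (b, max g |x - b|) := by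
      simp only [stepA, if_neg hb]
      by_cases hgt : max (|x - b|) g > g
      · rw [if_pos hgt]
        have : max g |x - b| = |x - b| := by omega
        rw [this]
      · rw [if_neg hgt]
        have : max g |x - b| = g := by omega
        rw [this]
    rw [List.foldl_cons, hstep, ih]
    rfl

-- the running max-of-|x-m| accumulator is a shifted running max
theorem foldAbs (m : Int) :
    ∀ (l : List Int) (g : Int), (∀ x ∈ l, m ≤ x) →
      l.foldl (fun g x => max g |x - m|) g = (l.foldl max (g + m)) - m := by
  intro l
  induction l with
  | nil => intro g _; simp only [List.foldl_nil]; omega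
  | cons x t ih =>
    intro g h
    have hx : m ≤ x := h x (by simp)
    have habs : |x - m| = x - m := abs_of_nonneg (by omega)
    rw [List.foldl_cons, habs, List.foldl_cons,
        ih (max g (x - m)) (fun y hy => h y (by simp [hy]))]
    have : max g (x - m) + m = max (g + m) x := by omega
    rw [this]

-- B-side invariant: while every element seen is above m, the stored minimum stays above m (or unset)
def Binv (m : Int) (s : Option Int × Option Int) : Prop :=
  s.1 = none ∨ ∃ v, s.1 = some v ∧ m < v

theorem foldl_stepB_inv (m : Int) :
    ∀ (l : List Int) (s : Option Int × Option Int), (∀ x ∈ l, m < x) → Binv m s →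
      Binv m (l.foldl stepB s) := by
  intro l
  induction l with
  | nil => intro s _ hs; exact hs
  | cons x t ih =>
    intro s h hs
    rw [List.foldl_cons]
    apply ih _ (fun y hy => h y (by simp [hy]))
    have hx : m < x := h x (by simp)
    rcases hs with h1 | ⟨v, hv, hmv⟩
    · obtain ⟨a, b⟩ := s
      simp only at h1; subst h1
      exact Or.inr ⟨x, rfl, hx⟩
    · obtain ⟨a, b⟩ := s
      simp only at hv; subst hv
      by_cases hlt : x < v
      · simp only [stepB, if_pos hlt]
        exact Or.inr ⟨x, rfl, hx⟩
      · have : stepB (some v, b) x =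
            match b with
            | none => (some v, some x)
            | some c => if x > c then (some v, some x) else (some v, some c) := by
          simp [stepB, hlt]
        rw [this]
        cases b with
        | none => exact Or.inr ⟨v, rfl, hmv⟩
        | some c =>
          by_cases hc : x > c
          · simp only [if_pos hc]; exact Or.inr ⟨v, rfl, hmv⟩
          · simp only [if_neg hc]; exact Or.inr ⟨v, rfl, hmv⟩

-- hitting the minimum resets B's state
theorem stepB_reset (m : Int) (s : Option Int × Option Int) (hs : Binv m s) :
    stepB s m = (some m, none) := by
  rcases hs with h1 | ⟨v, hv, hmv⟩
  · obtain ⟨a, b⟩ := s; simp only at h1; subst h1; rfl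
  · obtain ⟨a, b⟩ := s; simp only at hv; subst hv
    simp [stepB, hmv]

-- running-max phase of B, after the reset
theorem foldl_stepB_run (m : Int) :
    ∀ (t : List Int) (y : Int), (∀ x ∈ t, m ≤ x) →
      t.foldl stepB (some m, some y) = (some m, some (t.foldl max y)) := by
  intro t
  induction t with
  | nil => intro y _; rfl
  | cons z rest ih =>
    intro y h
    have hz : m ≤ z := h z (by simp)
    have hstep : stepB (some m, some y) z = (some m, some (max y z)) := by
      by_cases hzy : z > y
      · simp [stepB, not_lt.mpr hz, hzy, max_eq_right (le_of_lt hzy)]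
      · have hm : max y z = y := max_eq_left (by omega)
        simp [stepB, not_lt.mpr hz, hzy, hm]
    rw [List.foldl_cons, hstep, List.foldl_cons]
    exact ih (max y z) (fun x hx => h x (by simp [hx]))

-- after the reset, B is a plain running max of the suffix
theorem foldl_stepB_post (m : Int) :
    ∀ (l : List Int), (∀ x ∈ l, m ≤ x) →
      l.foldl stepB (some m, none) =
        (some m, match l with | [] => none | y :: rest => some (rest.foldl max y)) := by
  intro l hl
  cases l with
  | nil => rfl
  | cons y rest =>
    have hy : m ≤ y := hl y (by simp)
    have hfirst : stepB (some m, none) y = (some m, some y) := by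
      simp [stepB, not_lt.mpr hy]
    rw [List.foldl_cons, hfirst]
    exact foldl_stepB_run m rest y (fun x hx => hl x (by simp [hx]))

-- B's value on the first-minimum decomposition
theorem solution_alt_decomp (pre suf : List Int) (m : Int)
    (hpre : ∀ x ∈ pre, m < x) (hsuf : ∀ x ∈ suf, m ≤ x) :
    solution_alt (pre ++ m :: suf) =
      match suf with | [] => 0 | y :: rest => rest.foldl max y - m := by
  have h1 : Binv m (pre.foldl stepB (none, none)) :=
    foldl_stepB_inv m pre (none, none) hpre (Or.inl rfl)
  rw [solution_alt, List.foldl_append, List.foldl_cons,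
      stepB_reset m _ h1, foldl_stepB_post m suf hsuf]
  cases suf with
  | nil => rfl
  | cons y rest => rfl

theorem le_foldl_max_init : ∀ (l : List Int) (g : Int), g ≤ l.foldl max g := by
  intro l
  induction l with
  | nil => intro g; exact le_refl g
  | cons x t ih => intro g; exact le_trans (le_max_left g x) (ih (max g x))

theorem mem_le_foldl_max : ∀ (l : List Int) (g x : Int), x ∈ l → x ≤ l.foldl max g := by
  intro l
  induction l with
  | nil => intro g x hx; simp at hx
  | cons z t ih =>
    intro g x hx
    rcases List.mem_cons.mp hx with h | h
    · subst h; exact le_trans (le_max_right g x) (le_foldl_max_init t (max g x))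
    · exact ih (max g z) x h

theorem foldl_max_zero_of_all_zero : ∀ (l : List Int), (∀ x ∈ l, x = (0 : Int)) →
    l.foldl max 0 = 0 := by
  intro l
  induction l with
  | nil => intro _; rfl
  | cons x t ih =>
    intro h
    rw [List.foldl_cons, h x (by simp), max_self]
    exact ih (fun y hy => h y (by simp [hy]))

theorem dropWhile_ne_append (pre suf : List Int) (v : Int) (h : v ∉ pre) :
    (pre ++ v :: suf).dropWhile (· ≠ v) = v :: suf := by
  induction pre with
  | nil => simp
  | cons x t ih =>
    have hx : x ≠ v := by intro he; exact h (by simp [he])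
    rw [List.cons_append, List.dropWhile_cons, if_pos (by simp [hx])]
    exact ih (fun hm => h (by simp [hm]))

-- first-occurrence decomposition of the minimum
theorem min_decomp (input : List Int) (m : Int)
    (hm : PySem.List.min? input (fun y => y) = some m) :
    ∃ pre suf, input = pre ++ m :: suf ∧ (∀ x ∈ pre, m < x) ∧ m ∉ pre := by
  have hmem : m ∈ input := PySem.List.min?_mem hm
  obtain ⟨k, hk⟩ : ∃ k, PySem.List.index? input m = some k := by
    cases h : PySem.List.index? input m with
    | none => exact absurd ((PySem.List.index?_eq_none_iff _ _).mp h) (by simp [hmem])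
    | some v => exact ⟨v, rfl⟩
  obtain ⟨pre, suf, hdec, _, hnp⟩ := (PySem.List.index?_eq_some_iff _ _ _).mp hk
  refine ⟨pre, suf, hdec, ?_, hnp⟩
  intro x hx
  have hge : m ≤ x := PySem.List.min?_isMin hm x (by rw [hdec]; exact List.mem_append_left _ hx)
  have : x ≠ m := fun he => hnp (he ▸ hx)
  omega

theorem solution_spec : Claim_unchanged_solution := by
  intro input _hdom
  unfold Spec_solution
  intro hnd
  cases hmin : PySem.List.min? input (fun y => y) with
  | none =>
    have : input = [] := (PySem.List.min?_eq_none_iff _ _).mp hmin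
    subst this; rfl
  | some m =>
    obtain ⟨pre, suf, hdec, hpre, hnp⟩ := min_decomp input m hmin
    have hsuf : ∀ x ∈ suf, m ≤ x := by
      intro x hx
      exact PySem.List.min?_isMin hmin x (by rw [hdec]; exact List.mem_append_right _ (by simp [hx]))
    by_cases hm0 : m = 0
    · -- zero minimum: A returns 0; ¬D forces the suffix after the first 0 to be all zeros
      subst hm0
      rw [solution_eq_foldl, foldl_stepA_zero_min _ hmin]
      have hmem : (0 : Int) ∈ input := PySem.List.min?_mem hmin
      have hminall : ∀ y ∈ input, (0 : Int) ≤ y := PySem.List.min?_isMin hmin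
      have hall : ∀ y ∈ suf, y = (0 : Int) := by
        intro y hy
        by_contra hy0
        apply hnd
        refine ⟨hmem, hminall, ?_⟩
        rw [hdec, dropWhile_ne_append pre suf 0 hnp]
        simp only [List.tail_cons, List.any_eq_true]
        exact ⟨y, hy, by simpa using hy0⟩
      rw [hdec, solution_alt_decomp pre suf 0 hpre hsuf]
      cases suf with
      | nil => rfl
      | cons y rest =>
        have hy0 : y = 0 := hall y (by simp)
        have : rest.foldl max y = 0 := by
          rw [hy0]
          exact foldl_max_zero_of_all_zero rest (fun x hx => hall x (by simp [hx]))
        simp [this]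
    · -- nonzero minimum: both sides are the running max of x - m over the suffix
      rw [hdec] at hmin ⊢
      rw [solution_alt_decomp pre suf m hpre hsuf]
      rw [solution_eq_foldl, List.foldl_append]
      rw [foldl_stepA_pre _ pre (by
        intro z hz he
        have : z = m := by rw [hmin] at he; injection he
        exact absurd (hpre z hz) (by omega))]
      rw [List.foldl_cons]
      have hact : stepA (pre ++ m :: suf) ((0 : Int), (0 : Int)) m = (m, 0) := by
        simp [stepA, hmin]
      rw [hact, foldl_stepA_active _ m hm0]
      simp only
      rw [foldAbs m suf 0 hsuf]
      cases suf with
      | nil => simp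
      | cons y rest =>
        have hy : m ≤ y := hsuf y (by simp)
        rw [List.foldl_cons]
        have : max (0 + m) y = y := by omega
        rw [this]

theorem solution_changed : Claim_changed_solution := by
  unfold Claim_changed_solution; decide

theorem solution_tight : Claim_exact_solution := by
  intro input _hdom hD
  obtain ⟨h0, hnn, hany⟩ := hD
  have hmin : PySem.List.min? input (fun y => y) = some 0 := by
    cases h : PySem.List.min? input (fun y => y) with
    | none =>
      exact absurd ((PySem.List.min?_eq_none_iff _ _).mp h) (by
        intro he; rw [he] at h0; simp at h0)
    | some v =>
      have h1 : v ≤ 0 := PySem.List.min?_isMin h 0 h0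
      have h2 : 0 ≤ v := hnn v (PySem.List.min?_mem h)
      have : v = 0 := le_antisymm h1 h2
      rw [this]
  obtain ⟨pre, suf, hdec, hpre, hnp⟩ := min_decomp input 0 hmin
  have hA : solution input = 0 := by
    rw [solution_eq_foldl, foldl_stepA_zero_min _ hmin]
  rw [hdec] at hany
  rw [dropWhile_ne_append pre suf 0 hnp] at hany
  simp only [List.tail_cons, List.any_eq_true] at hany
  obtain ⟨y, hy, hy0⟩ := hany
  have hy0 : y ≠ 0 := by simpa using hy0
  have hsuf : ∀ x ∈ suf, (0 : Int) ≤ x := by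
    intro x hx
    exact hnn x (by rw [hdec]; exact List.mem_append_right _ (by simp [hx]))
  rw [hA, hdec, solution_alt_decomp pre suf 0 hpre hsuf]
  cases suf with
  | nil => simp at hy
  | cons z rest =>
    have hyle : y ≤ rest.foldl max z := by
      rcases List.mem_cons.mp hy with h | h
      · rw [h]; exact le_foldl_max_init rest z
      · exact mem_le_foldl_max rest z y h
    have hypos : (0 : Int) < y := lt_of_le_of_ne (hsuf y hy) (Ne.symm hy0)
    show (0 : Int) ≠ rest.foldl max z - 0
    omega
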